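-- pv_equiv track=rewrite | github.com/itzcheh1ru/product-categorization-ai-irwa | backend/data_finetuned/fine_tuned_classifier.py | _predict_subcategory
-- ===== SOURCE A (Python) =====
-- from typing import Dict, Any, List, Optional
--
-- def _predict_subcategory(category: str, product_data: Dict[str, Any]) -> str:
--     """Predict subcategory based on category and product data"""
--     # Simple rule-based subcategory prediction
--     description = product_data.get('description', '').lower()
--     product_name = product_data.get('productDisplayName', '').lower()
--     text = f"{product_name} {description}"
--
--     if category == 'Apparel':
--         if any(word in text for word in ['shirt', 't-shirt', 'tshirt', 'top', 'blouse']):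
--             return 'Topwear'
--         elif any(word in text for word in ['pants', 'jeans', 'trouser', 'shorts', 'skirt']):
--             return 'Bottomwear'
--         else:
--             return 'Topwear'
--     elif category == 'Footwear':
--         return 'Shoes'
--     elif category == 'Accessories':
--         if any(word in text for word in ['watch', 'timepiece']):
--             return 'Watches'
--         elif any(word in text for word in ['bag', 'handbag', 'purse']):
--             return 'Bags'
--         else:
--             return 'Watches'
--     else:
--         return 'General'
-- ===== SOURCE B (Python) =====
-- # B: flat keyword->subcategory map; compute the full set of matched subcategories in
-- # one comprehension, then resolve with a per-category priority order + fallback.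
-- _KEYWORD_SUB = {
--     'shirt': 'Topwear', 't-shirt': 'Topwear', 'tshirt': 'Topwear',
--     'top': 'Topwear', 'blouse': 'Topwear',
--     'pants': 'Bottomwear', 'jeans': 'Bottomwear', 'trouser': 'Bottomwear',
--     'shorts': 'Bottomwear', 'skirt': 'Bottomwear',
--     'watch': 'Watches', 'timepiece': 'Watches',
--     'bag': 'Bags', 'handbag': 'Bags', 'purse': 'Bags',
-- }
--
-- _PRIORITY = {
--     'Apparel': (['Topwear', 'Bottomwear'], 'Topwear'),
--     'Footwear': ([], 'Shoes'),
--     'Accessories': (['Watches', 'Bags'], 'Watches'),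
-- }
--
--
-- def _predict_subcategory(category, product_data):
--     entry = _PRIORITY.get(category)
--     if entry is None:
--         return 'General'
--     order, fallback = entry
--     text = "{} {}".format(product_data.get('productDisplayName', '').lower(),
--                           product_data.get('description', '').lower())
--     hits = {sub for kw, sub in _KEYWORD_SUB.items() if kw in text}
--     return next((s for s in order if s in hits), fallback)
-- ===== Notes on version B (the rewrite author's own statement) =====
-- stated objective: alternative
-- what changed: Instead of A's per-category short-circuit any() chains, B checks every keyword of a flat keyword->subcategory map once to build the set of matched subcategories, then resolves via a per-category priority list with fallback.
import Mathlib
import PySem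

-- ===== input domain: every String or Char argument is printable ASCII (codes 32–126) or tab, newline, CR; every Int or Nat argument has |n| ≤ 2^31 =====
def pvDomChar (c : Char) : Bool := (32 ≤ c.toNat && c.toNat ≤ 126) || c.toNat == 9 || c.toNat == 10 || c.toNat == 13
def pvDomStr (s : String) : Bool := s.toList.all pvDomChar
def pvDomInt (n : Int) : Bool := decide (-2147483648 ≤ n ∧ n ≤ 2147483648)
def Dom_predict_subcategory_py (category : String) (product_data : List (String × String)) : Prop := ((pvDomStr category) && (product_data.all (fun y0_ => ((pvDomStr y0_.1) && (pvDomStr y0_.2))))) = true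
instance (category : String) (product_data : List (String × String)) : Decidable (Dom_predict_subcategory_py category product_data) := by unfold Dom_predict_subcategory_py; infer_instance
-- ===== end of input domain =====

-- B replaces A's per-category short-circuit any() chains by a flat keyword->subcategory map
-- whose matches are collected into a set once, then resolved by a per-category priority list
-- with fallback (alternative decomposition; same cost, same results).


-- ===== PORT A =====
-- Literal transliteration of A's if/elif chain.
def predict_subcategory_py (category : String) (product_data : List (String × String)) : String :=
  let description := PySem.Str.lower ((PySem.Dict.mk product_data).getD "description" "")
  let product_name := PySem.Str.lower ((PySem.Dict.mk product_data).getD "productDisplayName" "")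
  let text := product_name ++ " " ++ description
  if category == "Apparel" then
    if (["shirt", "t-shirt", "tshirt", "top", "blouse"]).any (fun word => PySem.Str.isIn word text) then
      "Topwear"
    else if (["pants", "jeans", "trouser", "shorts", "skirt"]).any (fun word => PySem.Str.isIn word text) then
      "Bottomwear"
    else
      "Topwear"
  else if category == "Footwear" then
    "Shoes"
  else if category == "Accessories" then
    if (["watch", "timepiece"]).any (fun word => PySem.Str.isIn word text) then
      "Watches"
    else if (["bag", "handbag", "purse"]).any (fun word => PySem.Str.isIn word text) then
      "Bags"
    else
      "Watches"
  else
    "General"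

-- ===== PORT B =====
-- Flat keyword -> subcategory map (_KEYWORD_SUB), in dict item order.
def pvKeywordSub : PySem.Dict String String :=
  PySem.Dict.mk
    [ ("shirt", "Topwear"), ("t-shirt", "Topwear"), ("tshirt", "Topwear"),
      ("top", "Topwear"), ("blouse", "Topwear"),
      ("pants", "Bottomwear"), ("jeans", "Bottomwear"), ("trouser", "Bottomwear"),
      ("shorts", "Bottomwear"), ("skirt", "Bottomwear"),
      ("watch", "Watches"), ("timepiece", "Watches"),
      ("bag", "Bags"), ("handbag", "Bags"), ("purse", "Bags") ]

-- _PRIORITY: category -> (priority order, fallback)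
def pvPriority : PySem.Dict String (List String × String) :=
  PySem.Dict.mk
    [ ("Apparel", (["Topwear", "Bottomwear"], "Topwear")),
      ("Footwear", ([], "Shoes")),
      ("Accessories", (["Watches", "Bags"], "Watches")) ]

-- next((s for s in order if s in hits), fallback)
def pvFirstHit (hits : PySem.Set String) (fallback : String) : List String → String
  | [] => fallback
  | s :: rest => if PySem.Set.contains hits s then s else pvFirstHit hits fallback rest

def predict_subcategory_py_alt (category : String) (product_data : List (String × String)) : String :=
  match pvPriority.get? category with
  | none => "General"
  | some (order, fallback) =>
      let text := PySem.Str.lower ((PySem.Dict.mk product_data).getD "productDisplayName" "")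
                    ++ " " ++ PySem.Str.lower ((PySem.Dict.mk product_data).getD "description" "")
      -- {sub for kw, sub in _KEYWORD_SUB.items() if kw in text}
      let hits : PySem.Set String :=
        PySem.Set.ofList ((pvKeywordSub.items.filter (fun p => PySem.Str.isIn p.1 text)).map Prod.snd)
      pvFirstHit hits fallback order

-- ===== PRECONDITION & SPEC =====
def Spec_predict_subcategory_py (category : String) (product_data : List (String × String)) (out : String) : Prop := out = predict_subcategory_py_alt category product_data
instance (category : String) (product_data : List (String × String)) (out : String) : Decidable (Spec_predict_subcategory_py category product_data out) := by unfold Spec_predict_subcategory_py; infer_instance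

-- ===== CLAIM (what is proved, stated in full; the proofs are below) =====
def Claim_equal_predict_subcategory_py : Prop := ∀ (category : String) (product_data : List (String × String)), Dom_predict_subcategory_py category product_data → Spec_predict_subcategory_py category product_data (predict_subcategory_py category product_data)

-- ===== LEMMAS AND PROOFS =====
lemma pv_get_apparel : pvPriority.get? "Apparel" = some (["Topwear", "Bottomwear"], "Topwear") := by
  decide

lemma pv_get_footwear : pvPriority.get? "Footwear" = some ([], "Shoes") := by
  decide

lemma pv_get_accessories : pvPriority.get? "Accessories" = some (["Watches", "Bags"], "Watches") := by
  decide

lemma pv_get_other (category : String) (h1 : category ≠ "Apparel") (h2 : category ≠ "Footwear")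
    (h3 : category ≠ "Accessories") : pvPriority.get? category = none := by
  simp [pvPriority, PySem.Dict.get?, Ne.symm h1, Ne.symm h2, Ne.symm h3]

-- ===== VERDICT (by name: the statement is the Claim_ definition above) =====
theorem predict_subcategory_py_spec : Claim_equal_predict_subcategory_py := by
  intro category product_data _
  unfold Spec_predict_subcategory_py predict_subcategory_py predict_subcategory_py_alt
  by_cases h1 : category = "Apparel"
  · subst h1
    rw [pv_get_apparel]
    simp [pvFirstHit, pvKeywordSub]
  · by_cases h2 : category = "Footwear"
    · subst h2
      rw [pv_get_footwear]
      simp [pvFirstHit]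
    · by_cases h3 : category = "Accessories"
      · subst h3
        rw [pv_get_accessories]
        simp [pvFirstHit, pvKeywordSub]
      · rw [pv_get_other category h1 h2 h3]
        simp [h1, h2, h3]
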